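-- pv_equiv track=rewrite | github.com/Jane11111/Leetcode2021 | T002_2.py | solveAll
-- ===== SOURCE A (Python) =====
-- def solveAll(s,t):
--     m = len(s)
--     n = len(t)
--     dp = []
--     for i in range(m+1):
--         dp.append([0 for j in range(n+1)])
--
--     for j in range(n+1):
--         dp[m][j] = n-j
--     for i in range(m+1):
--         dp[i][n] = 0
--
--     for i in range(m-1,-1,-1):
--         for j in range(n-1,-1,-1):
--             if s[i]<t[j]:
--                 dp[i][j] = m-i+n-j
--             else:
--                 dp[i][j] = max(dp[i+1][j],dp[i][j+1])
--     return dp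
-- ===== SOURCE B (Python) =====
-- def solveAll(s, t):
--     # dp[i][j] = max(n-j, max over b>=j of (m-a)+(n-b) where a is the first index >= i
--     # with s[a] < t[b]).  Computed with a rolling "first match" array `best`
--     # (best[j] = (m-a)+(n-j) for the smallest a >= i with s[a] < t[j], 0 if none)
--     # and a right-to-left running suffix maximum per row.
--     m, n = len(s), len(t)
--     rows = [[n - j for j in range(n + 1)]]          # row m
--     best = [0] * n
--     for i in range(m - 1, -1, -1):
--         best = [m - i + n - j if s[i] < t[j] else best[j] for j in range(n)]
--         row = [0] * (n + 1)
--         cur = 0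
--         for j in range(n - 1, -1, -1):
--             cur = max(cur, best[j])
--             row[j] = max(n - j, cur)
--         rows.append(row)
--     rows.reverse()
--     return rows
-- ===== Notes on version B (the rewrite author's own statement) =====
-- stated objective: alternative
-- what changed: Replaces the max(dp[i+1][j],dp[i][j+1]) table recurrence by a closed-form characterisation dp[i][j] = max(n-j, max over b>=j of (m-a)+(n-b) for the first a>=i with s[a]<t[b]), computed with a rolling first-match array plus a right-to-left running suffix maximum per row; no cell ever reads dp[i+1][j] or dp[i][j+1].
import Mathlib
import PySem

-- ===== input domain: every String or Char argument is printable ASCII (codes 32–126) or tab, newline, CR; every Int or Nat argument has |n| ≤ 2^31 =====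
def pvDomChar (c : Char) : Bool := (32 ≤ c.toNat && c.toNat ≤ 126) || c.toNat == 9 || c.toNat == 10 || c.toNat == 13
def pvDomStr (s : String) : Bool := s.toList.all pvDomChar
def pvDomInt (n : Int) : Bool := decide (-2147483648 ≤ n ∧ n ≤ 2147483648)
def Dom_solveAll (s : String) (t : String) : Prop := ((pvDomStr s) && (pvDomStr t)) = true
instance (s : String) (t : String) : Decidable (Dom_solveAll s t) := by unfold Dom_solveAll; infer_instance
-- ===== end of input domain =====

-- B replaces A's max(dp[i+1][j],dp[i][j+1]) table recurrence by a closed-form characterisation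
-- (rolling first-match array + per-row suffix maximum); objective: alternative algorithm.

-- ===== PORT A =====
-- dp[i][j] read and dp[i][j] = v write (indices are always in range in A's loops)
def pvCellGet (dp : List (List Int)) (i j : Nat) : Int := (dp.getD i []).getD j 0
def pvCellSet (dp : List (List Int)) (i j : Nat) (v : Int) : List (List Int) :=
  dp.set i ((dp.getD i []).set j v)

-- literal port of A; range(k) → List.range k, range(k-1,-1,-1) → (List.range k).reverse (the same
-- descending index list, with Nat indices since all of A's indices are ≥ 0); s[i] → sc.getD i ' '
-- (always in range in A's loops, so no IndexError is reachable)
def solveAll (s : String) (t : String) : List (List Int) :=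
  let sc := s.toList
  let tc := t.toList
  let m := sc.length
  let n := tc.length
  let dp0 := (List.range (m+1)).foldl
    (fun dp _ => dp ++ [(List.range (n+1)).map (fun _ => (0:Int))]) []
  let dp1 := (List.range (n+1)).foldl (fun dp j => pvCellSet dp m j ((n:Int) - (j:Int))) dp0
  let dp2 := (List.range (m+1)).foldl (fun dp i => pvCellSet dp i n 0) dp1
  (List.range m).reverse.foldl (fun dp i =>
    (List.range n).reverse.foldl (fun dp j =>
      let v := if sc.getD i ' ' < tc.getD j ' ' then (m:Int) - (i:Int) + (n:Int) - (j:Int)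
               else max (pvCellGet dp (i+1) j) (pvCellGet dp i (j+1))
      pvCellSet dp i j v) dp) dp2

-- ===== PORT B =====
-- literal port of Source B: rolling `best` array (list comprehension → map over range n),
-- then a right-to-left pass keeping a running suffix maximum `cur` while writing into a
-- preallocated row ([0]*(n+1) → replicate, row[j] = v → set); rows appended then reversed
def solveAll_alt (s : String) (t : String) : List (List Int) :=
  let sc := s.toList
  let tc := t.toList
  let m := sc.length
  let n := tc.length
  let st := (List.range m).reverse.foldl (fun (st : List Int × List (List Int)) i =>
      let best := (List.range n).map (fun j =>
        if sc.getD i ' ' < tc.getD j ' ' then (m:Int) - (i:Int) + (n:Int) - (j:Int)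
        else st.1.getD j 0)
      let p := (List.range n).reverse.foldl
        (fun (p : Int × List Int) j =>
          let cur := max p.1 (best.getD j 0)
          (cur, p.2.set j (max ((n:Int) - (j:Int)) cur)))
        ((0:Int), List.replicate (n+1) (0:Int))
      (best, st.2 ++ [p.2]))
    (List.replicate n (0:Int), [(List.range (n+1)).map (fun (j : Nat) => (n:Int) - (j:Int))])
  st.2.reverse

-- ===== PRECONDITION & SPEC =====
def Spec_solveAll (s : String) (t : String) (out : List (List Int)) : Prop := out = solveAll_alt s t
instance (s : String) (t : String) (out : List (List Int)) : Decidable (Spec_solveAll s t out) := by unfold Spec_solveAll; infer_instance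

-- ===== CLAIM (what is proved, stated in full; the proofs are below) =====
def Claim_equal_solveAll : Prop := ∀ (s : String) (t : String), Dom_solveAll s t → Spec_solveAll s t (solveAll s t)

-- ===== LEMMAS AND PROOFS =====

-- the suffix (columns n-k .. n) of row i under A's recurrence, `below` being row i+1
def pvSuf (sc tc : List Char) (m n i : Nat) (below : List Int) : Nat → List Int
  | 0 => [(0:Int)]
  | k+1 =>
    let prev := pvSuf sc tc m n i below k
    (if sc.getD i ' ' < tc.getD (n-k-1) ' ' then (m:Int) - (i:Int) + (n:Int) - ((n-k-1 : Nat) : Int)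
     else max (below.getD (n-k-1) 0) (prev.headD 0)) :: prev

-- rows m-k .. m of the table
def pvTbl (sc tc : List Char) (m n : Nat) : Nat → List (List Int)
  | 0 => [(List.range (n+1)).map (fun (j : Nat) => (n:Int) - (j:Int))]
  | k+1 =>
    let prev := pvTbl sc tc m n k
    pvSuf sc tc m n (m-k-1) (prev.headD []) n :: prev

-- B's rolling first-match array after processing d rows (i = m-d .. m-1)
def pvBestRow (sc tc : List Char) (m n : Nat) : Nat → List Int
  | 0 => List.replicate n 0
  | d+1 => (List.range n).map (fun j =>
      if sc.getD (m-d-1) ' ' < tc.getD j ' '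
      then (m:Int) - ((m-d-1 : Nat) : Int) + (n:Int) - (j:Int)
      else (pvBestRow sc tc m n d).getD j 0)

-- suffix maximum of `best` over the last k columns (n-k .. n-1)
def pvSMax (best : List Int) (n : Nat) : Nat → Int
  | 0 => 0
  | k+1 => max (pvSMax best n k) (best.getD (n-k-1) 0)

def pvG (best : List Int) (n : Nat) (j : Nat) : Int :=
  max ((n:Int) - (j:Int)) (pvSMax best n (n-j))

def pvRowOf (best : List Int) (n : Nat) : List Int := (List.range (n+1)).map (pvG best n)

def pvRwRow (sc tc : List Char) (m n d : Nat) : List Int :=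
  pvRowOf (pvBestRow sc tc m n d) n

-- generic list facts ---------------------------------------------------------

theorem pv_foldl_fixed {α β : Type} (f : α → β → α) (a : α) (L : List β)
    (h : ∀ x ∈ L, f a x = a) : L.foldl f a = a := by
  induction L with
  | nil => rfl
  | cons x L ih =>
    simp only [List.foldl_cons, h x (by simp)]
    exact ih (fun y hy => h y (by simp [hy]))

theorem pv_foldl_snoc_replicate {α β : Type} (r : α) (acc : List α) (L : List β) :
    L.foldl (fun dp _ => dp ++ [r]) acc = acc ++ List.replicate L.length r := by
  induction L generalizing acc with
  | nil => simp
  | cons x L ih => simp [List.foldl_cons, ih, List.replicate_succ]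

theorem pv_foldl_range_reverse_succ {α : Type} (f : α → Nat → α) (a : α) (k : Nat) :
    (List.range (k+1)).reverse.foldl f a = (List.range k).reverse.foldl f (f a k) := by
  simp [List.range_succ]

theorem pv_getD_append_len {α : Type} (as : List α) (x : α) (bs : List α) (d : α) :
    (as ++ x :: bs).getD as.length d = x := by
  simp [List.getD, List.getElem?_append_right (Nat.le_refl as.length)]

theorem pv_getD_append_len_succ {α : Type} (as : List α) (x : α) (bs : List α) (d : α) :
    (as ++ x :: bs).getD (as.length + 1) d = bs.getD 0 d := by
  simp [List.getD, List.getElem?_append_right (Nat.le_succ_of_le (Nat.le_refl as.length))]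

theorem pv_getD_append_mid {α : Type} (as bs : List α) (d : α) :
    (as ++ bs).getD as.length d = bs.getD 0 d := by
  simp [List.getD, List.getElem?_append_right (Nat.le_refl as.length)]

theorem pv_getD_append_lt {α : Type} (as bs : List α) (i : Nat) (h : i < as.length) (d : α) :
    (as ++ bs).getD i d = as.getD i d := by
  simp [List.getD, List.getElem?_append_left h]

theorem pv_set_append_len {α : Type} (as : List α) (x : α) (bs : List α) (v : α) :
    (as ++ x :: bs).set as.length v = as ++ v :: bs := by
  induction as with
  | nil => simp
  | cons a as ih => simp [ih]

theorem pv_set_append_lt {α : Type} (as bs : List α) (i : Nat) (h : i < as.length) (v : α) :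
    (as ++ bs).set i v = as.set i v ++ bs := by
  induction as generalizing i with
  | nil => simp at h
  | cons a as ih =>
    cases i with
    | zero => simp
    | succ i => simp only [List.cons_append, List.set]; rw [ih _ (by simpa using h)]

theorem pv_replicate_set_last (k : Nat) (v : Int) :
    (List.replicate (k+1) (0:Int)).set k v = List.replicate k 0 ++ [v] := by
  rw [List.replicate_succ' (n := k)]
  have h := pv_set_append_len (List.replicate k (0:Int)) 0 [] v
  simpa using h

theorem pv_set_self_of_getElem? {α : Type} (l : List α) (i : Nat) (a : α)
    (h : l[i]? = some a) : l.set i a = l := by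
  induction l generalizing i with
  | nil => simp
  | cons x l ih =>
    cases i with
    | zero => simp_all
    | succ i => simp only [List.getElem?_cons_succ] at h; simp [ih _ h]

theorem pv_getD_zero_headD {α : Type} (l : List α) (d : α) : l.getD 0 d = l.headD d := by
  cases l <;> simp [List.getD]

theorem pv_getD_map_range (f : Nat → Int) (k j : Nat) (h : j < k) (d : Int) :
    ((List.range k).map f).getD j d = f j := by
  simp [List.getD, List.getElem?_map, List.getElem?_range, h]

-- inner loop of A equals pvSuf ------------------------------------------------

theorem pv_inner_A (sc tc : List Char) (m n i : Nat) (pref rest : List (List Int))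
    (hp : pref.length = i)
    (f : List (List Int) → Nat → List (List Int))
    (hf : ∀ dp j, f dp j = pvCellSet dp i j
      (if sc.getD i ' ' < tc.getD j ' ' then (m:Int) - (i:Int) + (n:Int) - (j:Int)
       else max (pvCellGet dp (i+1) j) (pvCellGet dp i (j+1)))) :
    ∀ j, j ≤ n →
    (List.range j).reverse.foldl f
      (pref ++ (List.replicate j 0 ++ pvSuf sc tc m n i (rest.headD []) (n-j)) :: rest)
      = pref ++ (pvSuf sc tc m n i (rest.headD []) n) :: rest := by
  intro j hj
  induction j with
  | zero => simp
  | succ j ih =>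
    rw [pv_foldl_range_reverse_succ, hf]
    have hstep : pvCellSet
        (pref ++ (List.replicate (j+1) 0 ++ pvSuf sc tc m n i (rest.headD []) (n-(j+1))) :: rest) i j
        (if sc.getD i ' ' < tc.getD j ' ' then (m:Int) - (i:Int) + (n:Int) - (j:Int)
         else max
           (pvCellGet (pref ++ (List.replicate (j+1) 0 ++ pvSuf sc tc m n i (rest.headD []) (n-(j+1))) :: rest) (i+1) j)
           (pvCellGet (pref ++ (List.replicate (j+1) 0 ++ pvSuf sc tc m n i (rest.headD []) (n-(j+1))) :: rest) i (j+1)))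
        = pref ++ (List.replicate j 0 ++ pvSuf sc tc m n i (rest.headD []) (n-j)) :: rest := by
      have hrowget := pv_getD_append_len pref
        (List.replicate (j+1) 0 ++ pvSuf sc tc m n i (rest.headD []) (n-(j+1))) rest []
      rw [hp] at hrowget
      have hbelowget := pv_getD_append_len_succ pref
        (List.replicate (j+1) 0 ++ pvSuf sc tc m n i (rest.headD []) (n-(j+1))) rest []
      rw [hp] at hbelowget
      unfold pvCellGet pvCellSet
      rw [hrowget, hbelowget]
      have hget1 : (List.replicate (j+1) (0:Int) ++ pvSuf sc tc m n i (rest.headD []) (n-(j+1))).getD (j+1) 0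
          = (pvSuf sc tc m n i (rest.headD []) (n-(j+1))).headD 0 := by
        have h1 := pv_getD_append_mid (List.replicate (j+1) (0:Int))
          (pvSuf sc tc m n i (rest.headD []) (n-(j+1))) (0:Int)
        rw [List.length_replicate] at h1
        rw [h1, pv_getD_zero_headD]
      rw [hget1, pv_getD_zero_headD]
      have hset : ∀ v : Int,
          (List.replicate (j+1) (0:Int) ++ pvSuf sc tc m n i (rest.headD []) (n-(j+1))).set j v
          = List.replicate j 0 ++ v :: pvSuf sc tc m n i (rest.headD []) (n-(j+1)) := by
        intro v
        rw [pv_set_append_lt _ _ _ (by simp), pv_replicate_set_last]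
        simp
      rw [hset]
      have hsuf : (if sc.getD i ' ' < tc.getD j ' ' then (m:Int) - (i:Int) + (n:Int) - (j:Int)
           else max ((rest.headD []).getD j 0) ((pvSuf sc tc m n i (rest.headD []) (n-(j+1))).headD 0))
          :: pvSuf sc tc m n i (rest.headD []) (n-(j+1)) = pvSuf sc tc m n i (rest.headD []) (n-j) := by
        have hnj : n - j = (n - (j+1)) + 1 := by omega
        have hidx : n - (n - (j+1)) - 1 = j := by omega
        rw [hnj]
        simp only [pvSuf, hidx]
      rw [hsuf]
      have h2 := pv_set_append_len pref
        (List.replicate (j+1) 0 ++ pvSuf sc tc m n i (rest.headD []) (n-(j+1))) rest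
        (List.replicate j 0 ++ pvSuf sc tc m n i (rest.headD []) (n-j))
      rw [hp] at h2
      exact h2
    rw [hstep]
    exact ih (by omega)

-- outer loop of A ------------------------------------------------------------

theorem pv_outer_A (sc tc : List Char) (m n : Nat)
    (g : List (List Int) → Nat → List (List Int))
    (hg : ∀ dp i, g dp i = (List.range n).reverse.foldl (fun dp j =>
        pvCellSet dp i j
          (if sc.getD i ' ' < tc.getD j ' ' then (m:Int) - (i:Int) + (n:Int) - (j:Int)
           else max (pvCellGet dp (i+1) j) (pvCellGet dp i (j+1)))) dp) :
    ∀ k, k ≤ m →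
    (List.range k).reverse.foldl g
      (List.replicate k (List.replicate (n+1) (0:Int)) ++ pvTbl sc tc m n (m-k))
      = pvTbl sc tc m n m := by
  intro k hk
  induction k with
  | zero => simp
  | succ k ih =>
    rw [pv_foldl_range_reverse_succ, hg]
    have hshape : List.replicate (k+1) (List.replicate (n+1) (0:Int)) ++ pvTbl sc tc m n (m-(k+1))
        = List.replicate k (List.replicate (n+1) (0:Int)) ++
            (List.replicate n 0 ++ pvSuf sc tc m n k ((pvTbl sc tc m n (m-(k+1))).headD []) (n-n))
            :: pvTbl sc tc m n (m-(k+1)) := by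
      rw [List.replicate_succ' (n := k)]
      simp [pvSuf, List.replicate_succ' (n := n), Nat.sub_self]
    rw [hshape]
    rw [pv_inner_A sc tc m n k
      (List.replicate k (List.replicate (n+1) (0:Int))) (pvTbl sc tc m n (m-(k+1)))
      (by simp) _ (fun _ _ => rfl) n (Nat.le_refl n)]
    have htbl : pvSuf sc tc m n k ((pvTbl sc tc m n (m-(k+1))).headD []) n :: pvTbl sc tc m n (m-(k+1))
        = pvTbl sc tc m n (m-k) := by
      have hmk : m - k = (m - (k+1)) + 1 := by omega
      have hidx : m - (m - (k+1)) - 1 = k := by omega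
      rw [hmk]
      simp only [pvTbl, hidx]
    rw [htbl]
    exact ih (by omega)

-- initialisation of A --------------------------------------------------------

theorem pv_init0 (m n : Nat) :
    (List.range (m+1)).foldl (fun dp _ => dp ++ [(List.range (n+1)).map (fun _ => (0:Int))]) []
      = List.replicate (m+1) (List.replicate (n+1) (0:Int)) := by
  rw [pv_foldl_snoc_replicate]
  simp [List.map_const']

theorem pv_init1 (m n : Nat)
    (f : List (List Int) → Nat → List (List Int))
    (hf : ∀ dp j, f dp j = pvCellSet dp m j ((n:Int) - (j:Int))) :
    ∀ k, k ≤ n+1 →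
    (List.range k).foldl f (List.replicate (m+1) (List.replicate (n+1) (0:Int)))
      = List.replicate m (List.replicate (n+1) (0:Int)) ++
          [(List.range k).map (fun (j : Nat) => (n:Int) - (j:Int)) ++ List.replicate (n+1-k) 0] := by
  intro k hk
  induction k with
  | zero =>
    simp only [List.range_zero, List.foldl_nil, List.map_nil, List.nil_append, Nat.sub_zero]
    rw [List.replicate_succ' (n := m)]
  | succ k ih =>
    rw [List.range_succ, List.foldl_append, ih (by omega)]
    simp only [List.foldl_cons, List.foldl_nil]
    rw [hf]
    have hrowget := pv_getD_append_len (List.replicate m (List.replicate (n+1) (0:Int)))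
      ((List.range k).map (fun (j : Nat) => (n:Int) - (j:Int)) ++ List.replicate (n+1-k) 0) [] []
    rw [List.length_replicate] at hrowget
    unfold pvCellSet
    rw [hrowget]
    have hset : ((List.range k).map (fun (j : Nat) => (n:Int) - (j:Int)) ++ List.replicate (n+1-k) 0).set k ((n:Int) - (k:Int))
        = (List.range (k+1)).map (fun (j : Nat) => (n:Int) - (j:Int)) ++ List.replicate (n+1-(k+1)) 0 := by
      have hrep : List.replicate (n+1-k) (0:Int) = 0 :: List.replicate (n-k) 0 := by
        have h : n+1-k = (n-k)+1 := by omega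
        rw [h, List.replicate_succ]
      have hlen : ((List.range k).map (fun (j : Nat) => (n:Int) - (j:Int))).length = k := by simp
      have h4 := pv_set_append_len ((List.range k).map (fun (j : Nat) => (n:Int) - (j:Int)))
        (0:Int) (List.replicate (n-k) 0) ((n:Int) - (k:Int))
      rw [hlen] at h4
      rw [hrep, h4, List.range_succ, List.map_append]
      have h2 : n+1-(k+1) = n-k := by omega
      simp [h2]
    rw [hset]
    have h3 := pv_set_append_len (List.replicate m (List.replicate (n+1) (0:Int)))
      ((List.range k).map (fun (j : Nat) => (n:Int) - (j:Int)) ++ List.replicate (n+1-k) 0) []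
      ((List.range (k+1)).map (fun (j : Nat) => (n:Int) - (j:Int)) ++ List.replicate (n+1-(k+1)) 0)
    rw [List.length_replicate] at h3
    rw [h3, List.range_succ]

theorem pv_init2 (m n : Nat) :
    (List.range (m+1)).foldl (fun dp i => pvCellSet dp i n 0)
      (List.replicate m (List.replicate (n+1) (0:Int)) ++
        [(List.range (n+1)).map (fun (j : Nat) => (n:Int) - (j:Int))])
      = List.replicate m (List.replicate (n+1) (0:Int)) ++
          [(List.range (n+1)).map (fun (j : Nat) => (n:Int) - (j:Int))] := by
  apply pv_foldl_fixed
  intro i hi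
  rw [List.mem_range] at hi
  show pvCellSet _ i n 0 = _
  rcases Nat.lt_or_ge i m with him | him
  · have hget : (List.replicate m (List.replicate (n+1) (0:Int)) ++
        [(List.range (n+1)).map (fun (j : Nat) => (n:Int) - (j:Int))]).getD i []
        = List.replicate (n+1) (0:Int) := by
      rw [pv_getD_append_lt _ _ _ (by simpa using him)]
      simp [List.getD, List.getElem?_replicate, him]
    have hzset : (List.replicate (n+1) (0:Int)).set n (0:Int) = List.replicate (n+1) (0:Int) := by
      rw [pv_replicate_set_last, ← List.replicate_succ' (n := n)]
    unfold pvCellSet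
    rw [hget, hzset]
    apply pv_set_self_of_getElem?
    rw [List.getElem?_append_left (by simpa using him)]
    simp [List.getElem?_replicate, him]
  · have him' : i = m := by omega
    rw [him']
    have hget := pv_getD_append_len (List.replicate m (List.replicate (n+1) (0:Int)))
      ((List.range (n+1)).map (fun (j : Nat) => (n:Int) - (j:Int))) [] []
    rw [List.length_replicate] at hget
    have hrset : ((List.range (n+1)).map (fun (j : Nat) => (n:Int) - (j:Int))).set n (0:Int)
        = (List.range (n+1)).map (fun (j : Nat) => (n:Int) - (j:Int)) := by
      have h0 : (0:Int) = (n:Int) - (n:Int) := by ring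
      rw [h0]
      apply pv_set_self_of_getElem?
      simp [List.getElem?_range]
    unfold pvCellSet
    rw [hget, hrset]
    apply pv_set_self_of_getElem?
    rw [List.getElem?_append_right (by simp)]
    simp

-- B-side: facts about pvBestRow / pvSMax -------------------------------------

theorem pv_best_le (sc tc : List Char) (m n : Nat) :
    ∀ d j, j < n → (pvBestRow sc tc m n d).getD j 0 ≤ (d:Int) + (n:Int) - (j:Int) := by
  intro d
  induction d with
  | zero => intro j hj; simp [pvBestRow, List.getD, List.getElem?_replicate, hj]; omega
  | succ d ih =>
    intro j hj
    rw [pvBestRow, pv_getD_map_range _ _ _ hj]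
    split
    · omega
    · have := ih j hj; omega

theorem pv_best_mono (sc tc : List Char) (m n : Nat) (d : Nat) (hd : d < m) :
    ∀ j, j < n → (pvBestRow sc tc m n d).getD j 0 ≤ (pvBestRow sc tc m n (d+1)).getD j 0 := by
  intro j hj
  rw [pvBestRow, pv_getD_map_range _ _ _ hj]
  split
  · have := pv_best_le sc tc m n d j hj; omega
  · exact le_refl _

theorem pv_smax_le (sc tc : List Char) (m n : Nat) (d : Nat) :
    ∀ k, k ≤ n → pvSMax (pvBestRow sc tc m n d) n k ≤ (d:Int) + (k:Int) := by
  intro k hk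
  induction k with
  | zero => simp [pvSMax]
  | succ k ih =>
    have h1 := ih (by omega)
    have h2 := pv_best_le sc tc m n d (n-k-1) (by omega)
    simp only [pvSMax]
    omega

theorem pv_smax_mono (sc tc : List Char) (m n : Nat) (d : Nat) (hd : d < m) :
    ∀ k, k ≤ n → pvSMax (pvBestRow sc tc m n d) n k ≤ pvSMax (pvBestRow sc tc m n (d+1)) n k := by
  intro k hk
  induction k with
  | zero => simp [pvSMax]
  | succ k ih =>
    have h1 := ih (by omega)
    have h2 := pv_best_mono sc tc m n d hd (n-k-1) (by omega)
    simp only [pvSMax]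
    omega

-- the closed form satisfies A's recurrence
theorem pv_key (sc tc : List Char) (m n d j : Nat) (hd : d < m) (hj : j < n) :
    pvG (pvBestRow sc tc m n (d+1)) n j =
      if sc.getD (m-d-1) ' ' < tc.getD j ' '
      then (m:Int) - ((m-d-1 : Nat) : Int) + (n:Int) - (j:Int)
      else max (pvG (pvBestRow sc tc m n d) n j) (pvG (pvBestRow sc tc m n (d+1)) n (j+1)) := by
  have hnj : n - j = (n-j-1)+1 := by omega
  have hcol : n - (n-j-1) - 1 = j := by omega
  have hj1 : n - (j+1) = n-j-1 := by omega
  have hbd1 : (pvBestRow sc tc m n (d+1)).getD j 0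
      = if sc.getD (m-d-1) ' ' < tc.getD j ' '
        then (m:Int) - ((m-d-1 : Nat) : Int) + (n:Int) - (j:Int)
        else (pvBestRow sc tc m n d).getD j 0 := by
    rw [pvBestRow, pv_getD_map_range _ _ _ hj]
  have hS1le := pv_smax_le sc tc m n (d+1) (n-j-1) (by omega)
  have hSmono := pv_smax_mono sc tc m n d hd (n-j-1) (by omega)
  unfold pvG
  rw [hj1, hnj]
  simp only [pvSMax, hcol, Nat.add_sub_cancel]
  rw [hbd1]
  split
  · -- s[i] < t[j]
    have hmd : ((m-d-1 : Nat) : Int) = (m:Int) - (d:Int) - 1 := by omega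
    rw [hmd] at *
    omega
  · -- else
    omega

-- A's row recurrence produces the closed-form rows ----------------------------

theorem pv_rowB (sc tc : List Char) (m n d : Nat) (hd : d < m) :
    ∀ k, k ≤ n →
    pvSuf sc tc m n (m-d-1) (pvRwRow sc tc m n d) k
      = (List.range' (n-k) (k+1)).map (pvG (pvBestRow sc tc m n (d+1)) n) := by
  intro k hk
  induction k with
  | zero =>
    simp [pvSuf, pvG, pvSMax, Nat.sub_self, List.range']
  | succ k ih =>
    have hj : n - k - 1 < n := by omega
    have hj1 : n - k - 1 + 1 = n - k := by omega
    have hget : (pvRwRow sc tc m n d).getD (n-k-1) 0 = pvG (pvBestRow sc tc m n d) n (n-k-1) := by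
      unfold pvRwRow pvRowOf
      exact pv_getD_map_range _ _ _ (by omega) _
    have hhead : ((List.range' (n-k) (k+1)).map (pvG (pvBestRow sc tc m n (d+1)) n)).headD 0
        = pvG (pvBestRow sc tc m n (d+1)) n (n-k) := by
      simp [List.range']
    have hrng : List.range' (n-(k+1)) (k+2) = (n-k-1) :: List.range' (n-k) (k+1) := by
      have h1 : n-(k+1) = n-k-1 := by omega
      rw [h1, List.range'_succ, hj1]
    simp only [pvSuf, ih (by omega), hget, hhead, hrng, List.map_cons]
    congr 1
    have hkey := pv_key sc tc m n d (n-k-1) hd hj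
    rw [hkey, hj1]

-- the whole table -------------------------------------------------------------

theorem pv_getD_replicate0 (n x : Nat) : (List.replicate n (0:Int)).getD x 0 = 0 := by
  rcases Nat.lt_or_ge x n with h | h
  · simp [List.getD, h]
  · simp [List.getD, Nat.not_lt.mpr h]

theorem pv_smax_zero (n : Nat) : ∀ k, pvSMax (List.replicate n 0) n k = 0 := by
  intro k
  induction k with
  | zero => rfl
  | succ k ih => simp [pvSMax, ih, pv_getD_replicate0]

theorem pv_base_row (sc tc : List Char) (m n : Nat) :
    pvRwRow sc tc m n 0 = (List.range (n+1)).map (fun (j : Nat) => (n:Int) - (j:Int)) := by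
  unfold pvRwRow pvRowOf
  apply List.map_congr_left
  intro j hj
  rw [List.mem_range] at hj
  have hz : ∀ k, pvSMax (pvBestRow sc tc m n 0) n k = 0 := fun k => pv_smax_zero n k
  rw [pvG, hz]
  omega

theorem pv_tblB (sc tc : List Char) (m n : Nat) :
    ∀ k, k ≤ m →
    pvTbl sc tc m n k = ((List.range (k+1)).reverse).map (pvRwRow sc tc m n) := by
  intro k hk
  induction k with
  | zero => simp [pvTbl, pv_base_row]
  | succ k ih =>
    have hrev : (List.range (k+2)).reverse = (k+1) :: (List.range (k+1)).reverse := by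
      rw [List.range_succ]; simp
    have hrev1 : (List.range (k+1)).reverse = k :: (List.range k).reverse := by
      rw [List.range_succ]; simp
    have hih := ih (by omega)
    have hhead : (pvTbl sc tc m n k).headD [] = pvRwRow sc tc m n k := by
      rw [hih, hrev1]; simp
    have hrow := pv_rowB sc tc m n k (by omega) n (le_refl n)
    have hrw : pvRwRow sc tc m n (k+1)
        = (List.range' 0 (n+1)).map (pvG (pvBestRow sc tc m n (k+1)) n) := by
      unfold pvRwRow pvRowOf
      rw [List.range_eq_range']
    simp only [pvTbl, Nat.sub_self] at hrow ⊢
    rw [hhead, hrow, hih, hrev, List.map_cons, hrw]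

-- B's inner loop computes pvRowOf ---------------------------------------------

theorem pv_innerB (best : List Int) (n : Nat)
    (f : Int × List Int → Nat → Int × List Int)
    (hf : ∀ p j, f p j = (max p.1 (best.getD j 0),
        p.2.set j (max ((n:Int) - (j:Int)) (max p.1 (best.getD j 0))))) :
    ∀ k, k ≤ n →
    (List.range k).reverse.foldl f
      (pvSMax best n (n-k),
       List.replicate k 0 ++ (List.range' k (n+1-k)).map (pvG best n))
      = (pvSMax best n n, pvRowOf best n) := by
  intro k hk
  induction k with
  | zero =>
    simp only [List.range_zero, List.reverse_nil, List.foldl_nil, Nat.sub_zero,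
      List.replicate_zero, List.nil_append]
    rw [pvRowOf, List.range_eq_range']
  | succ k ih =>
    rw [pv_foldl_range_reverse_succ, hf]
    have hcur : max (pvSMax best n (n-(k+1))) (best.getD k 0) = pvSMax best n (n-k) := by
      have h1 : n - k = (n-(k+1))+1 := by omega
      have h2 : n - (n-(k+1)) - 1 = k := by omega
      rw [h1]
      simp only [pvSMax, h2]
    have hrng : List.range' k (n+1-k) = k :: List.range' (k+1) (n-k) := by
      have h1 : n+1-k = (n-k)+1 := by omega
      rw [h1, List.range'_succ]
    have hrow : (List.replicate (k+1) (0:Int) ++ (List.range' (k+1) (n+1-(k+1))).map (pvG best n)).set k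
          (max ((n:Int) - (k:Int)) (max (pvSMax best n (n-(k+1))) (best.getD k 0)))
        = List.replicate k 0 ++ (List.range' k (n+1-k)).map (pvG best n) := by
      rw [hcur, pv_set_append_lt _ _ _ (by simp), pv_replicate_set_last]
      have h3 : n+1-(k+1) = n-k := by omega
      rw [hrng, List.map_cons, h3]
      have hg : pvG best n k = max ((n:Int) - (k:Int)) (pvSMax best n (n-k)) := rfl
      rw [← hg]
      simp
    rw [hrow, hcur]
    exact ih (by omega)

-- B's outer loop ---------------------------------------------------------------

theorem pv_outerB (sc tc : List Char) (m n : Nat)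
    (g : List Int × List (List Int) → Nat → List Int × List (List Int))
    (hg : ∀ st i, g st i =
      (let best := (List.range n).map (fun j =>
          if sc.getD i ' ' < tc.getD j ' ' then (m:Int) - (i:Int) + (n:Int) - (j:Int)
          else st.1.getD j 0)
       let p := (List.range n).reverse.foldl
         (fun (p : Int × List Int) j =>
           let cur := max p.1 (best.getD j 0)
           (cur, p.2.set j (max ((n:Int) - (j:Int)) cur)))
         ((0:Int), List.replicate (n+1) (0:Int))
       (best, st.2 ++ [p.2]))) :
    ∀ k, k ≤ m →
    (List.range k).reverse.foldl g
      (pvBestRow sc tc m n (m-k), (List.range (m-k+1)).map (pvRwRow sc tc m n))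
      = (pvBestRow sc tc m n m, (List.range (m+1)).map (pvRwRow sc tc m n)) := by
  intro k hk
  induction k with
  | zero => simp
  | succ k ih =>
    rw [pv_foldl_range_reverse_succ, hg]
    have hmk : m - k = (m-(k+1))+1 := by omega
    have hidx : m - (m-(k+1)) - 1 = k := by omega
    have hbest : (List.range n).map (fun j =>
        if sc.getD k ' ' < tc.getD j ' ' then (m:Int) - (k:Int) + (n:Int) - (j:Int)
        else (pvBestRow sc tc m n (m-(k+1))).getD j 0) = pvBestRow sc tc m n (m-k) := by
      rw [hmk]
      simp only [pvBestRow, hidx]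
    have hinit : ((0:Int), List.replicate (n+1) (0:Int))
        = (pvSMax (pvBestRow sc tc m n (m-k)) n (n-n),
           List.replicate n 0 ++ (List.range' n (n+1-n)).map (pvG (pvBestRow sc tc m n (m-k)) n)) := by
      have h1 : n+1-n = 1 := by omega
      have h2 : pvG (pvBestRow sc tc m n (m-k)) n n = 0 := by
        simp [pvG, pvSMax, Nat.sub_self]
      rw [h1]
      simp [pvSMax, Nat.sub_self, List.range', h2, ← List.replicate_succ' (n := n)]
    have hinner := pv_innerB (pvBestRow sc tc m n (m-k)) n _ (fun _ _ => rfl) n (le_refl n)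
    simp only [hbest, ← hinit] at hinner ⊢
    rw [hinner]
    have hrows : (List.range (m-(k+1)+1)).map (pvRwRow sc tc m n) ++ [pvRowOf (pvBestRow sc tc m n (m-k)) n]
        = (List.range (m-k+1)).map (pvRwRow sc tc m n) := by
      have h2 : m-(k+1)+1 = m-k := by omega
      rw [h2, List.range_succ, List.map_append]
      rfl
    simp only [hrows]
    exact ih (by omega)

-- ===== VERDICT (by name: the statement is the Claim_ definition above) =====
theorem solveAll_spec : Claim_equal_solveAll := by
  intro s t _
  unfold Spec_solveAll
  simp only [solveAll, solveAll_alt]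
  rw [pv_init0 s.toList.length t.toList.length,
      pv_init1 s.toList.length t.toList.length _ (fun _ _ => rfl) (t.toList.length+1) (Nat.le_refl _)]
  simp only [Nat.sub_self, List.replicate_zero, List.append_nil]
  rw [pv_init2 s.toList.length t.toList.length]
  have hA := pv_outer_A s.toList t.toList s.toList.length t.toList.length
    (fun dp i => (List.range t.toList.length).reverse.foldl (fun dp j =>
        let v := if s.toList.getD i ' ' < t.toList.getD j ' '
                 then (s.toList.length:Int) - (i:Int) + (t.toList.length:Int) - (j:Int)
                 else max (pvCellGet dp (i+1) j) (pvCellGet dp i (j+1))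
        pvCellSet dp i j v) dp)
    (fun _ _ => rfl) s.toList.length (Nat.le_refl _)
  simp only [Nat.sub_self] at hA
  have hA0 : pvTbl s.toList t.toList s.toList.length t.toList.length 0
      = [(List.range (t.toList.length+1)).map (fun (j : Nat) => (t.toList.length:Int) - (j:Int))] := rfl
  rw [hA0] at hA
  rw [hA]
  have hB := pv_outerB s.toList t.toList s.toList.length t.toList.length _ (fun _ _ => rfl)
    s.toList.length (Nat.le_refl _)
  simp only [Nat.sub_self] at hB
  have hB0 : pvBestRow s.toList t.toList s.toList.length t.toList.length 0
      = List.replicate t.toList.length 0 := rfl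
  rw [hB0] at hB
  have hB1 : (List.range (0+1)).map (pvRwRow s.toList t.toList s.toList.length t.toList.length)
      = [(List.range (t.toList.length+1)).map (fun (j : Nat) => (t.toList.length:Int) - (j:Int))] := by
    simp [pv_base_row]
  rw [hB1] at hB
  rw [hB]
  rw [pv_tblB s.toList t.toList s.toList.length t.toList.length s.toList.length (le_refl _)]
  simp [List.map_reverse]
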